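-- pv_equiv track=rewrite | github.com/sanskarkosare/Valorant-VCT-VISION-Project | app_live.py | check_team_comp
-- ===== SOURCE A (Python) =====
-- def clean_agent(name): return name.lower().replace("/", "").replace(" ", "").strip() if name else "unknown"
--
-- def check_team_comp(agent_list):
--     agents = set([clean_agent(a) for a in agent_list])
--     duelists, controllers = {"jett", "raze", "reyna", "phoenix", "yoru", "neon", "iso"}, {"omen", "brimstone", "viper", "astra", "harbor", "clove"}
--     initiators, sentinels = {"sova", "breach", "skye", "kayo", "fade", "gekko", "tejo"}, {"killjoy", "cypher", "sage", "chamber", "deadlock", "vyse", "waylay"}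
--     d, c, i, s = len(agents & duelists), len(agents & controllers), len(agents & initiators), len(agents & sentinels)
--     if (i == 2 and d == 1 and s == 1 and c == 1) or (c == 2 and d == 1 and i == 1 and s == 1): return 2
--     if d == 2 and c == 1 and i == 1 and s == 1: return 1
--     return 0
-- ===== SOURCE B (Python) =====
-- # Role weights encode the four role tallies as base-8 digits of one integer code;
-- # the verdict is a direct lookup of that code in a small result table.
-- WEIGHT = {
--     "jett": 1, "raze": 1, "reyna": 1, "phoenix": 1, "yoru": 1, "neon": 1, "iso": 1,
--     "omen": 8, "brimstone": 8, "viper": 8, "astra": 8, "harbor": 8, "clove": 8,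
--     "sova": 64, "breach": 64, "skye": 64, "kayo": 64, "fade": 64, "gekko": 64, "tejo": 64,
--     "killjoy": 512, "cypher": 512, "sage": 512, "chamber": 512, "deadlock": 512, "vyse": 512, "waylay": 512,
-- }
-- # code = d + 8*c + 64*i + 512*s; each role has at most 7 agents, so digits never carry.
-- RESULT = {1 + 8 + 2 * 64 + 512: 2,   # d=1,c=1,i=2,s=1
--           1 + 2 * 8 + 64 + 512: 2,   # d=1,c=2,i=1,s=1
--           2 + 8 + 64 + 512: 1}       # d=2,c=1,i=1,s=1
--
-- def clean_agent(name): return name.lower().replace("/", "").replace(" ", "").strip() if name else "unknown"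
--
-- def check_team_comp(agent_list):
--     code = sum(WEIGHT.get(a, 0) for a in {clean_agent(x) for x in agent_list})
--     return RESULT.get(code, 0)
-- ===== Notes on version B (the rewrite author's own statement) =====
-- stated objective: alternative
-- what changed: A computes four role counts via four set intersections and compares the count tuple in branches; B packs the whole role profile into a single integer by summing per-agent base-8 digit weights (1/8/64/512) over the deduplicated cleaned agents and reads the verdict off a three-entry code->result table.
import Mathlib
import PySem

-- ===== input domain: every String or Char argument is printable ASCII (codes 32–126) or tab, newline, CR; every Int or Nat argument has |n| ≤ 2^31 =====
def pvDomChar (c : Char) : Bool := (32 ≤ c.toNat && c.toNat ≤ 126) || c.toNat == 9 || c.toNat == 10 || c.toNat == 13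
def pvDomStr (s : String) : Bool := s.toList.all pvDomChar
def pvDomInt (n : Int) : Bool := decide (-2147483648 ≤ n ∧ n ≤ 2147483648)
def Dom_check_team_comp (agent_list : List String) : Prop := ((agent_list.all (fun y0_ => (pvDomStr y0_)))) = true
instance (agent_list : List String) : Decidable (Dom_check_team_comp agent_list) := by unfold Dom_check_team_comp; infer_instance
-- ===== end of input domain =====

-- B replaces A's four set intersections and branch-on-four-counts with a single weighted sum:
-- each agent's role contributes a distinct base-8 digit weight, so the team's role profile is
-- packed into one integer code, and the verdict is a direct lookup of that code in a result
-- table (objective: alternative).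

-- ===== PORT A =====
def cleanAgent (name : String) : String :=
  if name ≠ "" then
    PySem.Str.strip (PySem.Str.replace (PySem.Str.replace (PySem.Str.lower name) "/" "") " " "")
  else "unknown"

def check_team_comp (agent_list : List String) : Int :=
  let agents : PySem.Set String := PySem.Set.ofList (agent_list.map cleanAgent)
  let duelists : PySem.Set String := PySem.Set.ofList ["jett", "raze", "reyna", "phoenix", "yoru", "neon", "iso"]
  let controllers : PySem.Set String := PySem.Set.ofList ["omen", "brimstone", "viper", "astra", "harbor", "clove"]
  let initiators : PySem.Set String := PySem.Set.ofList ["sova", "breach", "skye", "kayo", "fade", "gekko", "tejo"]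
  let sentinels : PySem.Set String := PySem.Set.ofList ["killjoy", "cypher", "sage", "chamber", "deadlock", "vyse", "waylay"]
  let d : Int := PySem.Set.len (PySem.Set.inter agents duelists)
  let c : Int := PySem.Set.len (PySem.Set.inter agents controllers)
  let i : Int := PySem.Set.len (PySem.Set.inter agents initiators)
  let s : Int := PySem.Set.len (PySem.Set.inter agents sentinels)
  if (i = 2 ∧ d = 1 ∧ s = 1 ∧ c = 1) ∨ (c = 2 ∧ d = 1 ∧ i = 1 ∧ s = 1) then 2
  else if d = 2 ∧ c = 1 ∧ i = 1 ∧ s = 1 then 1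
  else 0

-- ===== PORT B =====
-- the module-level dict literals WEIGHT and RESULT of Source B
def WEIGHT : PySem.Dict String Int := PySem.Dict.mk
  [("jett", 1), ("raze", 1), ("reyna", 1), ("phoenix", 1), ("yoru", 1), ("neon", 1), ("iso", 1),
   ("omen", 8), ("brimstone", 8), ("viper", 8), ("astra", 8), ("harbor", 8), ("clove", 8),
   ("sova", 64), ("breach", 64), ("skye", 64), ("kayo", 64), ("fade", 64), ("gekko", 64), ("tejo", 64),
   ("killjoy", 512), ("cypher", 512), ("sage", 512), ("chamber", 512), ("deadlock", 512), ("vyse", 512), ("waylay", 512)]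

def RESULT : PySem.Dict Int Int := PySem.Dict.mk
  [(1 + 8 + 2 * 64 + 512, 2), (1 + 2 * 8 + 64 + 512, 2), (2 + 8 + 64 + 512, 1)]

-- sum over the set comprehension {clean_agent(x) for x in agent_list}: order-independent, exact
def check_team_comp_alt (agent_list : List String) : Int :=
  let code : Int :=
    (PySem.Set.ofList (agent_list.map cleanAgent)).foldl
      (fun acc a => acc + PySem.Dict.getD WEIGHT a 0) 0
  PySem.Dict.getD RESULT code 0

-- ===== PRECONDITION & SPEC =====
def Spec_check_team_comp (agent_list : List String) (out : Int) : Prop := out = check_team_comp_alt agent_list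
instance (agent_list : List String) (out : Int) : Decidable (Spec_check_team_comp agent_list out) := by unfold Spec_check_team_comp; infer_instance

-- ===== CLAIM (what is proved, stated in full; the proofs are below) =====
def Claim_equal_check_team_comp : Prop := ∀ (agent_list : List String), Dom_check_team_comp agent_list → Spec_check_team_comp agent_list (check_team_comp agent_list)

-- ===== LEMMAS AND PROOFS =====

-- |l ∩ set(names)| as an Int, l traversed in order
def cntZ (names : List String) (l : List String) : Int :=
  ((l.filter (fun b => PySem.Set.contains (PySem.Set.ofList names) b)).length : Int)

def duelNames : List String := ["jett", "raze", "reyna", "phoenix", "yoru", "neon", "iso"]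
def ctrlNames : List String := ["omen", "brimstone", "viper", "astra", "harbor", "clove"]
def initNames : List String := ["sova", "breach", "skye", "kayo", "fade", "gekko", "tejo"]
def sentNames : List String := ["killjoy", "cypher", "sage", "chamber", "deadlock", "vyse", "waylay"]

theorem cntZ_cons (names : List String) (a : String) (l : List String) :
    cntZ names (a :: l)
      = (if PySem.Set.contains (PySem.Set.ofList names) a then (1:Int) else 0) + cntZ names l := by
  simp only [cntZ, List.filter_cons]
  split
  · simp
    ring
  · simp

-- an agent's weight is exactly its base-8 digit contribution to the four role counts
theorem weight_split (b : String) :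
    PySem.Dict.getD WEIGHT b 0
      = (if PySem.Set.contains (PySem.Set.ofList duelNames) b then (1:Int) else 0)
        + 8 * (if PySem.Set.contains (PySem.Set.ofList ctrlNames) b then (1:Int) else 0)
        + 64 * (if PySem.Set.contains (PySem.Set.ofList initNames) b then (1:Int) else 0)
        + 512 * (if PySem.Set.contains (PySem.Set.ofList sentNames) b then (1:Int) else 0) := by
  rcases h : PySem.Dict.get? WEIGHT b with _ | w
  · have hfalse : ∀ names : List String,
        names = duelNames ∨ names = ctrlNames ∨ names = initNames ∨ names = sentNames →
        PySem.Set.contains (PySem.Set.ofList names) b = false := by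
      intro names hn
      by_contra hb
      rw [Bool.not_eq_false, PySem.Set.contains_iff] at hb
      rw [PySem.Set.mem_ofList] at hb
      rcases hn with rfl | rfl | rfl | rfl <;>
        · fin_cases hb <;> exact absurd h (by decide)
    rw [PySem.Dict.getD_eq_get?_getD, h,
        hfalse duelNames (by tauto), hfalse ctrlNames (by tauto),
        hfalse initNames (by tauto), hfalse sentNames (by tauto)]
    norm_num
  · have hm : (b, w) ∈ PySem.Dict.items WEIGHT := PySem.Dict.mem_items_of_get?_eq_some WEIGHT h
    rw [PySem.Dict.getD_eq_get?_getD, h]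
    have hitems : PySem.Dict.items WEIGHT =
      [("jett", (1:Int)), ("raze", 1), ("reyna", 1), ("phoenix", 1), ("yoru", 1), ("neon", 1), ("iso", 1),
       ("omen", 8), ("brimstone", 8), ("viper", 8), ("astra", 8), ("harbor", 8), ("clove", 8),
       ("sova", 64), ("breach", 64), ("skye", 64), ("kayo", 64), ("fade", 64), ("gekko", 64), ("tejo", 64),
       ("killjoy", 512), ("cypher", 512), ("sage", 512), ("chamber", 512), ("deadlock", 512), ("vyse", 512), ("waylay", 512)] := rfl
    rw [hitems] at hm
    fin_cases hm <;> decide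

theorem foldl_weight (l : List String) (x : Int) :
    l.foldl (fun acc a => acc + PySem.Dict.getD WEIGHT a 0) x
      = x + cntZ duelNames l + 8 * cntZ ctrlNames l + 64 * cntZ initNames l + 512 * cntZ sentNames l := by
  induction l generalizing x with
  | nil => simp [cntZ]
  | cons a l ih =>
    rw [List.foldl_cons, ih, weight_split a, cntZ_cons, cntZ_cons, cntZ_cons, cntZ_cons]
    ring

theorem cntZ_nonneg (names l : List String) : 0 ≤ cntZ names l := by
  simp [cntZ]

theorem cntZ_le (names l : List String) (h : l.Nodup) : cntZ names l ≤ (names.length : Int) := by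
  have hsub : (l.filter (fun b => PySem.Set.contains (PySem.Set.ofList names) b)) ⊆ names := by
    intro x hx
    have hx' := List.of_mem_filter hx
    rw [PySem.Set.contains_iff, PySem.Set.mem_ofList] at hx'
    exact hx'
  have hnd := h.filter (fun b => PySem.Set.contains (PySem.Set.ofList names) b)
  have hle := (List.subperm_of_subset hnd hsub).length_le
  simpa [cntZ] using Int.ofNat_le.mpr hle

theorem branch_eq (d c i s : Int)
    (hd0 : 0 ≤ d) (hc0 : 0 ≤ c) (hi0 : 0 ≤ i) (_hs0 : 0 ≤ s)
    (hd7 : d ≤ 7) (hc6 : c ≤ 6) (hi7 : i ≤ 7) (_hs7 : s ≤ 7) :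
    (if (i = 2 ∧ d = 1 ∧ s = 1 ∧ c = 1) ∨ (c = 2 ∧ d = 1 ∧ i = 1 ∧ s = 1) then (2:Int)
     else if d = 2 ∧ c = 1 ∧ i = 1 ∧ s = 1 then 1 else 0)
      = PySem.Dict.getD RESULT (0 + d + 8 * c + 64 * i + 512 * s) 0 := by
  split_ifs with h1 h2
  · rcases h1 with ⟨hi, hd, hs, hc⟩ | ⟨hc, hd, hi, hs⟩ <;>
      rw [hd, hc, hi, hs] <;> decide
  · obtain ⟨hd, hc, hi, hs⟩ := h2
    rw [hd, hc, hi, hs]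
    decide
  · have hne : 0 + d + 8 * c + 64 * i + 512 * s ≠ 1 + 8 + 2 * 64 + 512 ∧
        0 + d + 8 * c + 64 * i + 512 * s ≠ 1 + 2 * 8 + 64 + 512 ∧
        0 + d + 8 * c + 64 * i + 512 * s ≠ 2 + 8 + 64 + 512 := by omega
    rw [PySem.Dict.getD_eq_get?_getD]
    rw [RESULT]
    rw [PySem.Dict.get?_mk_cons, PySem.Dict.get?_mk_cons, PySem.Dict.get?_mk_cons]
    simp only [beq_iff_eq]
    rw [if_neg (fun h => hne.1 h.symm), if_neg (fun h => hne.2.1 h.symm),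
        if_neg (fun h => hne.2.2 h.symm)]
    rfl

theorem check_eq (l : List String) : check_team_comp l = check_team_comp_alt l := by
  have hnd : (PySem.Set.ofList (l.map cleanAgent)).Nodup := PySem.Set.nodup_ofList _
  have hA : check_team_comp l =
      (if (cntZ initNames (PySem.Set.ofList (l.map cleanAgent)) = 2 ∧
            cntZ duelNames (PySem.Set.ofList (l.map cleanAgent)) = 1 ∧
            cntZ sentNames (PySem.Set.ofList (l.map cleanAgent)) = 1 ∧
            cntZ ctrlNames (PySem.Set.ofList (l.map cleanAgent)) = 1) ∨
          (cntZ ctrlNames (PySem.Set.ofList (l.map cleanAgent)) = 2 ∧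
            cntZ duelNames (PySem.Set.ofList (l.map cleanAgent)) = 1 ∧
            cntZ initNames (PySem.Set.ofList (l.map cleanAgent)) = 1 ∧
            cntZ sentNames (PySem.Set.ofList (l.map cleanAgent)) = 1) then (2:Int)
       else if cntZ duelNames (PySem.Set.ofList (l.map cleanAgent)) = 2 ∧
            cntZ ctrlNames (PySem.Set.ofList (l.map cleanAgent)) = 1 ∧
            cntZ initNames (PySem.Set.ofList (l.map cleanAgent)) = 1 ∧
            cntZ sentNames (PySem.Set.ofList (l.map cleanAgent)) = 1 then 1 else 0) := rfl
  have hB : check_team_comp_alt l =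
      PySem.Dict.getD RESULT
        ((PySem.Set.ofList (l.map cleanAgent)).foldl
          (fun acc a => acc + PySem.Dict.getD WEIGHT a 0) 0) 0 := rfl
  rw [hA, hB, foldl_weight]
  exact branch_eq _ _ _ _
    (cntZ_nonneg duelNames _) (cntZ_nonneg ctrlNames _) (cntZ_nonneg initNames _) (cntZ_nonneg sentNames _)
    (cntZ_le duelNames _ hnd) (cntZ_le ctrlNames _ hnd) (cntZ_le initNames _ hnd) (cntZ_le sentNames _ hnd)

-- ===== VERDICT (by name: the statement is the Claim_ definition above) =====
theorem check_team_comp_spec : Claim_equal_check_team_comp := by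
  intro l _
  unfold Spec_check_team_comp
  exact check_eq l
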